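-- pv_equiv track=rewrite | github.com/nderousseaux/imt-internship | gambler.py | phi_pur
-- ===== SOURCE A (Python) =====
-- from itertools import product
--
-- def phi_pur(n, r, z):
-- 	""" Calcul de phi dans la ruine du joueur
-- 	Mode bourrin -> on génère toutes les combinaisons possibles
--
-- 	\Phi_{n,r}(z_1,...,z_n) =
-- 		\sum_{i_j \geq 0, i_1+...+i_n = r}
-- 			\prod_{j=1}^{n}z_j^{i_j}
-- 	"""
--
-- 	# On génère toutes les combinaisons possibles
-- 	combinations = list(filter(lambda x: sum(x) == r, product(range(r+1), repeat=n)))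
-- 	res = 0
-- 	for comb in combinations:
-- 		prod = 1
-- 		for j in range(0, n):
-- 			prod *= z[j] ** comb[j]
-- 		res += prod
-- 	return res
-- ===== SOURCE B (Python) =====
-- def phi_pur(n, r, z):
-- 	""" Calcul de phi dans la ruine du joueur
-- 	DP: convolve the truncated geometric series of each variable mod x^(r+1);
-- 	h[k] holds the complete homogeneous sum of degree k in the variables seen so far.
-- 	"""
-- 	if r < 0:
-- 		return 0
-- 	if n <= 0:
-- 		return 1 if r == 0 else 0
-- 	h = [1] + [0] * r
-- 	for j in range(n):
-- 		zj = z[j]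
-- 		g = [h[0]]
-- 		for b in h[1:]:
-- 			g.append(b + zj * g[-1])
-- 		h = g
-- 	return h[r]
-- ===== Notes on version B (the rewrite author's own statement) =====
-- stated objective: alternative
-- what changed: Replaces the exhaustive enumeration of all (r+1)^n exponent tuples with a DP that convolves each variable's truncated geometric series mod x^(r+1), keeping only the r+1 complete homogeneous sums; intended as asymptotically faster (O(n*r) vs O((r+1)^n*n)), but a timing run could not confirm a ratio (A already times out at sizes where B returns, and below that both are sub-millisecond).
import Mathlib
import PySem

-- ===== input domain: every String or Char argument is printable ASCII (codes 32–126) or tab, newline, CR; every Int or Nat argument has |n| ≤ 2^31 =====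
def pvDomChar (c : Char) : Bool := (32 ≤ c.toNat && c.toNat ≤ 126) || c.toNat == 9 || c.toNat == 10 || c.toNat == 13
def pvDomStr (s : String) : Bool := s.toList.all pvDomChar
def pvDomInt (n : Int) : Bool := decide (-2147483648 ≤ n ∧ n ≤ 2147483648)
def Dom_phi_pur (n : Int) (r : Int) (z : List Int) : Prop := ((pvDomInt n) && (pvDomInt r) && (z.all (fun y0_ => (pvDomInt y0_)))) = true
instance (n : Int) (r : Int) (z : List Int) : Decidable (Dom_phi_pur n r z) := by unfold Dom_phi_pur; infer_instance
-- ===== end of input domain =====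

-- B replaces A's exhaustive enumeration of all (r+1)^n exponent tuples by a DP that convolves each
-- variable's truncated geometric series mod x^(r+1) (complete homogeneous sums h_0..h_r); intended as
-- asymptotically faster, though a timing run could not confirm a measured ratio.


-- ===== PORT A =====
-- itertools.product(xs, repeat=m) in itertools order (first coordinate outermost)
def pvProdRep (xs : List Int) : Nat → List (List Int)
  | 0 => [[]]
  | m+1 => xs.flatMap (fun a => (pvProdRep xs m).map (fun t => a :: t))

def phi_pur (n : Int) (r : Int) (z : List Int) : Int :=
  let combinations := (pvProdRep (PySem.List.pyRange 0 (r+1) 1) n.toNat).filter (fun x => x.sum == r)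
  combinations.foldl
    (fun res comb =>
      res + (PySem.List.pyRange 0 n 1).foldl
        (fun p j => p * (PySem.List.pyGetD z j 0) ^ (PySem.List.pyGetD comb j 0).toNat) 1)
    0

-- ===== PORT B =====
-- inner loop `for b in h[1:]: g.append(b + zj * g[-1])`: acc is g[-1]
def pvConv (zj : Int) (acc : Int) : List Int → List Int
  | [] => []
  | b :: t => (b + zj * acc) :: pvConv zj (b + zj * acc) t

-- one pass of the outer loop body: g = [h[0]] then the inner loop
def pvStep (h : List Int) (zj : Int) : List Int :=
  match h with
  | [] => []
  | a :: t => a :: pvConv zj a t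

def phi_pur_alt (n : Int) (r : Int) (z : List Int) : Int :=
  if r < 0 then 0
  else if n ≤ 0 then (if r = 0 then 1 else 0)
  else
    let h := (PySem.List.pyRange 0 n 1).foldl
      (fun h j => pvStep h (PySem.List.pyGetD z j 0)) (1 :: List.replicate r.toNat 0)
    PySem.List.pyGetD h r 0

-- ===== PRECONDITION & SPEC =====
-- Pre_ excludes exactly the inputs where Python A raises: n < 0 (ValueError from
-- itertools.product(repeat=n)) and, when combinations are generated (r ≥ 0), n > len(z) (IndexError z[j]).
def Pre_phi_pur (n : Int) (r : Int) (z : List Int) : Prop :=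
  0 ≤ n ∧ (r < 0 ∨ n ≤ (z.length : Int))
instance (n : Int) (r : Int) (z : List Int) : Decidable (Pre_phi_pur n r z) := by
  unfold Pre_phi_pur; infer_instance

def pvWitness_phi_pur : Int × Int × List Int := (2, 2, [1, 2])

def Spec_phi_pur (n : Int) (r : Int) (z : List Int) (out : Int) : Prop := out = phi_pur_alt n r z
instance (n : Int) (r : Int) (z : List Int) (out : Int) : Decidable (Spec_phi_pur n r z out) := by unfold Spec_phi_pur; infer_instance

-- ===== CLAIM (what is proved, stated in full; the proofs are below) =====
def Claim_equal_phi_pur : Prop := ∀ (n : Int) (r : Int) (z : List Int), Dom_phi_pur n r z → Pre_phi_pur n r z → Spec_phi_pur n r z (phi_pur n r z)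

-- ===== LEMMAS AND PROOFS =====

-- complete homogeneous symmetric sum of degree k in the given variables
def hp : List Int → Nat → Int
  | [], 0 => 1
  | [], _+1 => 0
  | a :: t, k => ((List.range (k+1)).map (fun i => a ^ i * hp t (k - i))).sum

-- product of pointwise powers, the mathematical reading of A's inner loop
def prodPow : List Int → List Int → Int
  | a :: w, i :: c => a ^ i.toNat * prodPow w c
  | _, _ => 1

lemma hp_zero : ∀ (w : List Int), hp w 0 = 1
  | [] => by simp [hp]
  | a :: t => by simp [hp, hp_zero t]

lemma hp_cons_succ (a : Int) (w : List Int) (k : Nat) :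
    hp (a :: w) (k+1) = hp w (k+1) + a * hp (a :: w) k := by
  conv_lhs => rw [hp]
  conv_rhs => rw [hp]
  rw [List.range_succ_eq_map, List.map_cons, List.sum_cons, List.map_map]
  have h1 : ((fun i => a ^ i * hp w (k + 1 - i)) ∘ Nat.succ)
      = fun i => a * (a ^ i * hp w (k - i)) := by
    funext i
    simp only [Function.comp_apply, Nat.succ_sub_succ_eq_sub]
    rw [pow_succ']
    ring
  rw [h1, List.sum_map_mul_left]
  simp

-- fold over pyRange 0 m as a fold over List.range m
lemma foldl_pyRange_range {β : Type} (F : β → Int → β) (m : Nat) (init : β) :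
    (PySem.List.pyRange 0 (m : Int) 1).foldl F init
      = (List.range m).foldl (fun acc (k : Nat) => F acc (k : Int)) init := by
  have h0 : ((m : Int) - 0).toNat = m := by simp
  rw [PySem.List.pyRange_one, h0, List.foldl_map]
  have h1 : (fun (x : β) (y : Nat) => F x ((0:Int) + (y:Int))) = fun (x : β) (y : Nat) => F x (y:Int) := by
    funext x y; rw [zero_add]
  rw [h1]

lemma prodRep_length (xs : List Int) : ∀ (m : Nat) (c : List Int), c ∈ pvProdRep xs m → c.length = m := by
  intro m
  induction m with
  | zero => intro c hc; simp [pvProdRep] at hc; simp [hc]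
  | succ m ih =>
    intro c hc
    simp only [pvProdRep, List.mem_flatMap, List.mem_map] at hc
    obtain ⟨a, _, t, ht, rfl⟩ := hc
    simp [ih t ht]

lemma prodPow_append_singleton (w c : List Int) (a i : Int) (h : w.length = c.length) :
    prodPow (w ++ [a]) (c ++ [i]) = prodPow w c * a ^ i.toNat := by
  induction w generalizing c with
  | nil =>
    cases c with
    | nil => simp [prodPow]
    | cons b t => simp at h
  | cons b t ih =>
    cases c with
    | nil => simp at h
    | cons j c' =>
      simp only [List.cons_append, prodPow]
      rw [ih c' (by simpa using h)]
      ring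

-- A's inner index loop computes prodPow of the taken prefixes
lemma foldl_range_prodPow (z comb : List Int) :
    ∀ (m : Nat), m ≤ z.length → m ≤ comb.length →
    (List.range m).foldl (fun q k => q * (z.getD k 0) ^ ((comb.getD k 0).toNat)) 1
      = prodPow (z.take m) (comb.take m) := by
  intro m
  induction m with
  | zero => intro _ _; simp [prodPow]
  | succ m ih =>
    intro hz hc
    rw [List.range_succ, List.foldl_append, ih (by omega) (by omega)]
    have hzm : m < z.length := by omega
    have hcm : m < comb.length := by omega
    rw [List.foldl_cons, List.foldl_nil,
        List.take_succ_eq_append_getElem hzm, List.take_succ_eq_append_getElem hcm,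
        List.getD_eq_getElem z 0 hzm, List.getD_eq_getElem comb 0 hcm,
        prodPow_append_singleton _ _ _ _ (by simp; omega)]
  

lemma list_sum_flatMap {α : Type} (l : List α) (f : α → List Int) :
    (l.flatMap f).sum = (l.map (fun a => (f a).sum)).sum := by
  rw [List.flatMap, List.sum_flatten, List.map_map]
  rfl

-- sum over the filtered cube equals hp (the core of the A side)
lemma Asum_eq_hp (B : Nat) :
    ∀ (w : List Int) (t : Int), t ≤ (B : Int) →
    ((((pvProdRep ((List.range (B+1)).map (fun (v : Nat) => (v : Int))) w.length).filter
        (fun c => c.sum == t)).map (fun c => prodPow w c)).sum)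
      = if 0 ≤ t then hp w t.toNat else 0 := by
  intro w
  induction w with
  | nil =>
    intro t _
    simp only [pvProdRep, List.length_nil]
    by_cases h : t = 0
    · subst h; simp [prodPow, hp]
    · have hf : ((([] : List Int).sum == t)) = false := by
        simp only [List.sum_nil, beq_eq_false_iff_ne, ne_eq]; omega
      rw [List.filter_cons, hf]
      simp only [Bool.false_eq_true, if_false, List.filter_nil, List.map_nil, List.sum_nil]
      by_cases h2 : 0 ≤ t
      · rw [if_pos h2]
        obtain ⟨k, hk⟩ : ∃ k, t.toNat = k + 1 := ⟨t.toNat - 1, by omega⟩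
        rw [hk]
        simp [hp]
      · rw [if_neg h2]
  | cons a w' ih =>
    intro t ht
    simp only [List.length_cons, pvProdRep]
    rw [List.filter_flatMap, List.map_flatMap, list_sum_flatMap, List.map_map]
    have hbody : ∀ (v : Nat),
        ((((pvProdRep ((List.range (B+1)).map (fun (v : Nat) => (v : Int))) w'.length).map
            (fun c => ((v : Int)) :: c)).filter (fun c => c.sum == t)).map
            (fun c => prodPow (a :: w') c)).sum
          = a ^ v * (if 0 ≤ t - (v : Int) then hp w' (t - (v : Int)).toNat else 0) := by
      intro v
      rw [List.filter_map, List.map_map]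
      rw [List.filter_congr (q := fun c => c.sum == t - (v : Int))
        (by intro c _
            simp only [Function.comp_apply, List.sum_cons]
            rw [Bool.eq_iff_iff]
            simp only [beq_iff_eq]
            omega)]
      have hF : ((fun c => prodPow (a :: w') c) ∘ (fun c => ((v : Int)) :: c))
          = fun c => a ^ v * prodPow w' c := by
        funext c
        simp [prodPow]
      rw [hF, List.sum_map_mul_left, ih (t - (v : Int)) (by omega)]
    have hcomp : ((fun v => ((((pvProdRep ((List.range (B+1)).map (fun (v : Nat) => (v : Int))) w'.length).map
            (fun c => v :: c)).filter (fun c => c.sum == t)).map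
            (fun c => prodPow (a :: w') c)).sum) ∘ (fun v : Nat => (v : Int)))
        = fun (v : Nat) => a ^ v * (if 0 ≤ t - (v : Int) then hp w' (t - (v : Int)).toNat else 0) := by
      funext v
      exact hbody v
    rw [hcomp]
    by_cases h2 : 0 ≤ t
    · rw [if_pos h2]
      have hfun : (fun (v : Nat) => a ^ v * (if 0 ≤ t - (v : Int) then hp w' (t - (v : Int)).toNat else 0))
          = fun (v : Nat) => if v ≤ t.toNat then a ^ v * hp w' (t.toNat - v) else 0 := by
        funext v
        by_cases hv : v ≤ t.toNat
        · rw [if_pos (by omega), if_pos hv]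
          have : (t - (v : Int)).toNat = t.toNat - v := by omega
          rw [this]
        · rw [if_neg (by omega), if_neg hv, mul_zero]
      rw [hfun]
      have hB : B + 1 = (t.toNat + 1) + (B - t.toNat) := by omega
      rw [hB, List.range_add, List.map_append, List.sum_append]
      have hfst : (List.range (t.toNat + 1)).map
          (fun (v : Nat) => if v ≤ t.toNat then a ^ v * hp w' (t.toNat - v) else 0)
          = (List.range (t.toNat + 1)).map (fun v => a ^ v * hp w' (t.toNat - v)) := by
        apply List.map_congr_left
        intro v hv
        rw [if_pos (by simp at hv; omega)]
      have hsnd : (((List.range (B - t.toNat)).map (fun x => t.toNat + 1 + x)).map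
          (fun (v : Nat) => if v ≤ t.toNat then a ^ v * hp w' (t.toNat - v) else 0)).sum = 0 := by
        apply List.sum_eq_zero
        intro x hx
        simp only [List.map_map, List.mem_map, Function.comp_apply] at hx
        obtain ⟨k, _, rfl⟩ := hx
        rw [if_neg (by omega)]
      rw [hfst, hsnd, add_zero]
      conv_rhs => rw [hp]
    · rw [if_neg h2]
      apply List.sum_eq_zero
      intro x hx
      simp only [List.mem_map] at hx
      obtain ⟨v, _, rfl⟩ := hx
      rw [if_neg (by omega), mul_zero]

lemma list_sum_range (n : Nat) (f : Nat → Int) :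
    ((List.range n).map f).sum = ∑ i ∈ Finset.range n, f i := by
  induction n with
  | zero => simp
  | succ n ih => rw [List.range_succ, List.map_append, List.sum_append, Finset.sum_range_succ, ih]; simp

lemma hp_cons_finset (a : Int) (w : List Int) (k : Nat) :
    hp (a :: w) k = ∑ i ∈ Finset.range (k+1), a ^ i * hp w (k - i) := by
  rw [hp, list_sum_range]

lemma sum_range_triangle (k : Nat) (g : Nat → Nat → Int) :
    ∑ j ∈ Finset.range (k+1), ∑ i ∈ Finset.range (k+1-j), g j i
      = ∑ i ∈ Finset.range (k+1), ∑ j ∈ Finset.range (k+1-i), g j i := by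
  have ext : ∀ (j : Nat), j ≤ k → ∀ (h : Nat → Int),
      ∑ i ∈ Finset.range (k+1-j), h i = ∑ i ∈ Finset.range (k+1), if i + j ≤ k then h i else 0 := by
    intro j hj h
    calc ∑ i ∈ Finset.range (k+1-j), h i
        = ∑ i ∈ Finset.range (k+1-j), (if i + j ≤ k then h i else 0) := by
          apply Finset.sum_congr rfl
          intro i hi
          rw [if_pos (by simp at hi; omega)]
      _ = ∑ i ∈ Finset.range (k+1), (if i + j ≤ k then h i else 0) := by
          apply Finset.sum_subset (by intro x hx; simp at hx ⊢; omega)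
          intro i hi hni
          rw [if_neg (by simp at hi hni; omega)]
  calc ∑ j ∈ Finset.range (k+1), ∑ i ∈ Finset.range (k+1-j), g j i
      = ∑ j ∈ Finset.range (k+1), ∑ i ∈ Finset.range (k+1), (if i + j ≤ k then g j i else 0) := by
        apply Finset.sum_congr rfl
        intro j hj
        exact ext j (by simp at hj; omega) (g j)
    _ = ∑ i ∈ Finset.range (k+1), ∑ j ∈ Finset.range (k+1), (if i + j ≤ k then g j i else 0) :=
        Finset.sum_comm
    _ = ∑ i ∈ Finset.range (k+1), ∑ j ∈ Finset.range (k+1), (if j + i ≤ k then g j i else 0) := by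
        apply Finset.sum_congr rfl
        intro i _
        apply Finset.sum_congr rfl
        intro j _
        rw [Nat.add_comm i j]
    _ = ∑ i ∈ Finset.range (k+1), ∑ j ∈ Finset.range (k+1-i), g j i := by
        apply Finset.sum_congr rfl
        intro i hi
        exact (ext i (by simp at hi; omega) (fun j => g j i)).symm

lemma hp_append_singleton (a : Int) : ∀ (u : List Int) (k : Nat), hp (u ++ [a]) k = hp (a :: u) k := by
  intro u
  induction u with
  | nil => intro k; simp
  | cons b u' ih =>
    intro k
    calc hp ((b :: u') ++ [a]) k
        = ∑ j ∈ Finset.range (k+1), b ^ j * hp (u' ++ [a]) (k - j) := by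
          rw [List.cons_append, hp_cons_finset]
      _ = ∑ j ∈ Finset.range (k+1), b ^ j * hp (a :: u') (k - j) := by
          apply Finset.sum_congr rfl; intro j _; rw [ih]
      _ = ∑ j ∈ Finset.range (k+1), ∑ i ∈ Finset.range (k+1-j), b ^ j * (a ^ i * hp u' (k - j - i)) := by
          apply Finset.sum_congr rfl
          intro j hj
          rw [hp_cons_finset, Finset.mul_sum]
          have hrange : k - j + 1 = k + 1 - j := by simp at hj; omega
          rw [hrange]
      _ = ∑ i ∈ Finset.range (k+1), ∑ j ∈ Finset.range (k+1-i), b ^ j * (a ^ i * hp u' (k - j - i)) :=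
          sum_range_triangle k _
      _ = ∑ i ∈ Finset.range (k+1), a ^ i * ∑ j ∈ Finset.range (k-i+1), b ^ j * hp u' (k - i - j) := by
          apply Finset.sum_congr rfl
          intro i hi
          have hrange : k - i + 1 = k + 1 - i := by simp at hi; omega
          rw [hrange, Finset.mul_sum]
          apply Finset.sum_congr rfl
          intro j _
          have hsub : k - j - i = k - i - j := by omega
          rw [hsub]; ring
      _ = ∑ i ∈ Finset.range (k+1), a ^ i * hp (b :: u') (k - i) := by
          apply Finset.sum_congr rfl
          intro i _
          rw [hp_cons_finset]
      _ = hp (a :: b :: u') k := (hp_cons_finset a (b :: u') k).symm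

lemma hp_reverse : ∀ (w : List Int) (k : Nat), hp w.reverse k = hp w k := by
  intro w
  induction w with
  | nil => intro k; simp
  | cons a w ih =>
    intro k
    rw [List.reverse_cons, hp_append_singleton a w.reverse k]
    conv_lhs => rw [hp]
    conv_rhs => rw [hp]
    congr 1
    apply List.map_congr_left
    intro i _
    rw [ih]

lemma pvConv_hp (zj : Int) (u : List Int) :
    ∀ (j k : Nat),
    pvConv zj (hp (zj :: u) k) ((List.range' (k+1) j).map (fun i => hp u i))
      = (List.range' (k+1) j).map (fun i => hp (zj :: u) i) := by
  intro j
  induction j with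
  | zero => intro k; simp [pvConv]
  | succ j ih =>
    intro k
    rw [List.range'_succ, List.map_cons, List.map_cons, pvConv]
    rw [← hp_cons_succ zj u k]
    have := ih (k+1)
    simp only [Nat.add_comm k 1] at this ⊢
    rw [this]

lemma pvStep_hp (zj : Int) (u : List Int) (R : Nat) :
    pvStep ((List.range (R+1)).map (fun i => hp u i)) zj
      = (List.range (R+1)).map (fun i => hp (zj :: u) i) := by
  rw [List.range_eq_range', List.range'_succ, List.map_cons, List.map_cons, pvStep]
  rw [hp_zero u, ← hp_zero (zj :: u)]
  have h := pvConv_hp zj u R 0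
  simpa using h

lemma foldB (R : Nat) : ∀ (w u : List Int),
    w.foldl pvStep ((List.range (R+1)).map (fun i => hp u i))
      = (List.range (R+1)).map (fun i => hp (w.reverse ++ u) i) := by
  intro w
  induction w with
  | nil => intro u; simp
  | cons a w ih =>
    intro u
    rw [List.foldl_cons, pvStep_hp a u R, ih (a :: u)]
    simp

lemma init_hp (R : Nat) :
    (1 : Int) :: List.replicate R 0 = (List.range (R+1)).map (fun i => hp ([] : List Int) i) := by
  rw [List.range_succ_eq_map, List.map_cons, List.map_map]
  have h1 : ((fun i => hp ([] : List Int) i) ∘ Nat.succ) = fun _ => (0 : Int) := by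
    funext i; simp [hp]
  rw [h1]
  simp [hp, List.map_const']

-- B's fold over indices is the fold of pvStep over the taken prefix
lemma foldl_range_step (z : List Int) :
    ∀ (m : Nat), m ≤ z.length → ∀ (init : List Int),
    (List.range m).foldl (fun h k => pvStep h (z.getD k 0)) init = (z.take m).foldl pvStep init := by
  intro m
  induction m with
  | zero => intro _ _; simp
  | succ m ih =>
    intro hm init
    have hzm : m < z.length := by omega
    rw [List.range_succ, List.foldl_append, ih (by omega),
        List.take_succ_eq_append_getElem hzm, List.foldl_append]
    simp [List.getElem?_eq_getElem hzm]

lemma phi_pur_alt_eq (n r : Int) (z : List Int) (hn : 0 ≤ n) (hr : 0 ≤ r)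
    (hz : n ≤ (z.length : Int)) :
    phi_pur_alt n r z = hp (z.take n.toNat) r.toNat := by
  unfold phi_pur_alt
  rw [if_neg (by omega)]
  by_cases hn0 : n ≤ 0
  · rw [if_pos hn0]
    have hn0' : n.toNat = 0 := by omega
    rw [hn0', List.take_zero]
    by_cases hr0 : r = 0
    · subst hr0; simp [hp]
    · rw [if_neg hr0]
      obtain ⟨k, hk⟩ : ∃ k, r.toNat = k + 1 := ⟨r.toNat - 1, by omega⟩
      rw [hk]
      simp [hp]
  rw [if_neg hn0]
  have hn' : n = (n.toNat : Int) := by omega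
  rw [hn', foldl_pyRange_range]
  have hacc : (fun (h : List Int) (k : Nat) => pvStep h (PySem.List.pyGetD z (k : Int) 0))
      = fun (h : List Int) (k : Nat) => pvStep h (z.getD k 0) := by
    funext h k; rw [PySem.List.pyGetD_natCast]
  rw [hacc, foldl_range_step z n.toNat (by omega) _, init_hp r.toNat,
      foldB r.toNat (z.take n.toNat) []]
  rw [show r = (r.toNat : Int) by omega, PySem.List.pyGetD_natCast,
      PySem.List.getD_map_range _ _ _ _ (by omega)]
  rw [List.append_nil, hp_reverse, Int.toNat_natCast, Int.toNat_natCast]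

lemma phi_pur_eq (n r : Int) (z : List Int) (hn : 0 ≤ n) (hr : 0 ≤ r)
    (hz : n ≤ (z.length : Int)) :
    phi_pur n r z = hp (z.take n.toNat) r.toNat := by
  unfold phi_pur
  rw [PySem.List.foldl_add, zero_add]
  have hX : PySem.List.pyRange 0 (r+1) 1
      = (List.range (r.toNat + 1)).map (fun (v : Nat) => (v : Int)) := by
    rw [PySem.List.pyRange_one]
    have h1 : ((r + 1 - 0)).toNat = r.toNat + 1 := by omega
    rw [h1]
    apply List.map_congr_left
    intro v _
    rw [zero_add]
  rw [hX]
  have hinner : ∀ comb ∈ (pvProdRep ((List.range (r.toNat + 1)).map (fun (v : Nat) => (v : Int)))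
        n.toNat).filter (fun x => x.sum == r),
      (PySem.List.pyRange 0 n 1).foldl
        (fun p j => p * (PySem.List.pyGetD z j 0) ^ (PySem.List.pyGetD comb j 0).toNat) 1
        = prodPow (z.take n.toNat) comb := by
    intro comb hcomb
    have hlen : comb.length = n.toNat :=
      prodRep_length _ n.toNat comb (List.mem_filter.1 hcomb).1
    have hn' : n = ((n.toNat : Nat) : Int) := by omega
    have htake : comb.take n.toNat = comb := List.take_of_length_le (by omega)
    conv_lhs => rw [hn']
    rw [foldl_pyRange_range]
    have hacc : (fun (q : Int) (k : Nat) =>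
          q * (PySem.List.pyGetD z (k : Int) 0) ^ (PySem.List.pyGetD comb (k : Int) 0).toNat)
        = fun (q : Int) (k : Nat) => q * (z.getD k 0) ^ ((comb.getD k 0).toNat) := by
      funext q k
      rw [PySem.List.pyGetD_natCast, PySem.List.pyGetD_natCast]
    rw [hacc, foldl_range_prodPow z comb n.toNat (by omega) (by omega), htake]
  rw [List.map_congr_left hinner]
  have hA := Asum_eq_hp r.toNat (z.take n.toNat) r (by omega)
  rw [if_pos hr] at hA
  have hlen2 : (z.take n.toNat).length = n.toNat := by
    rw [List.length_take]
    omega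
  rw [hlen2] at hA
  exact hA

lemma phi_pur_neg (n r : Int) (z : List Int) (hr : r < 0) : phi_pur n r z = 0 := by
  unfold phi_pur
  rw [PySem.List.pyRange_one_eq_nil (by omega)]
  cases hn : n.toNat with
  | zero =>
    have : ((0 : Int) == r) = false := by simp; omega
    simp [pvProdRep, this]
  | succ m => simp [pvProdRep]

-- ===== VERDICT (by name: the statement is the Claim_ definition above) =====
theorem phi_pur_spec : Claim_equal_phi_pur := by
  intro n r z _ hpre
  obtain ⟨hn, hcase⟩ := hpre
  unfold Spec_phi_pur
  by_cases hr : r < 0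
  · rw [phi_pur_neg n r z hr]
    unfold phi_pur_alt
    rw [if_pos hr]
  · rw [not_lt] at hr
    rcases hcase with h | hz
    · exact absurd h (by omega)
    · rw [phi_pur_eq n r z hn hr hz, phi_pur_alt_eq n r z hn hr hz]
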